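-- pv_equiv track=rewrite | github.com/kiangkiangkiang/Information-Extraction-for-Chinese-NLP | information_extraction/model/preprocessing.py | drift_offsets_mapping
-- ===== SOURCE A (Python) =====
-- from typing import Optional, List, Any, Dict, Union, Tuple
--
-- def drift_offsets_mapping(offset_mapping: Tuple[Tuple[int, int]]) -> Tuple[List[List[int]], int]:
--     """Scale the offset_mapping in tokenization output to align with the prompt learning format.
--
--     Note: 因為 tokenize 後有些字會被 tokenize 在一起，所以 index 會和原本的有所差異，因此需做調整，將 tokenize 前後的 index 對齊。
--
--     Args:
--         offset_mapping (Tuple[Tuple[int, int]]): Tokenization outpu. Use argument 'return_offsets_mapping=True'.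
--
--     Returns:
--         1. List[List[int, int]]: Scaled format, which is to adjust index after adding '[CLS] prompt [SEP]'.
--         2. int: Drift term, which defines the scaling of drift after adjustment.
--     """
--
--     offset_mapping = [list(x) for x in offset_mapping]
--     drift = 0
--     for index in range(1, len(offset_mapping)):
--         mapping = offset_mapping[index]
--         if mapping[0] == 0 and mapping[1] == 0 and drift == 0:
--             drift = offset_mapping[index - 1][1] + 1  # [SEP] token
--         if mapping[0] == 0 and mapping[1] == 0:
--             continue
--         offset_mapping[index][0] += drift
--         offset_mapping[index][1] += drift
--     return offset_mapping, drift
-- ===== SOURCE B (Python) =====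
-- def drift_offsets_mapping(offset_mapping):
--     oms = [list(p) for p in offset_mapping]
--     head, tail = oms[:1], oms[1:]
--     # split the tail on [0, 0] delimiters, like str.split
--     segments = [[]]
--     for p in tail:
--         if p == [0, 0]:
--             segments.append([])
--         else:
--             segments[-1].append(p)
--     if len(segments) == 1:
--         return head + segments[0], 0
--     drift = (head + segments[0])[-1][1] + 1
--     shifted = [[[a + drift, b + drift] for a, b in seg] for seg in segments[1:]]
--     out = head + segments[0]
--     for seg in shifted:
--         out += [[0, 0]] + seg
--     return out, drift
-- ===== Notes on version B (the rewrite author's own statement) =====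
-- stated objective: alternative
-- what changed: Replaces A's flag-driven in-place pass by a delimiter-split: the tail is split on (0,0) sentinels into segments (as str.split would), every segment after the first is shifted wholesale by the boundary drift, and the segments are rejoined with (0,0) separators.
-- intended difference: On inputs whose first (0,0) pair follows an entry ending in -1 while a later (0,0) follows an entry not ending in -1, A's drift==0 'not yet set' sentinel accidentally re-triggers and A shifts the tail by that later boundary, while B uses the first (0,0) as the [SEP] boundary (drift 0), the intended behaviour since drift==0 is only A's leftover sentinel state. — e.g. on drift_offsets_mapping([(0, -1), (0, 0), (1, 2), (0, 0), (3, 4)]): A returns ([[0, -1], [0, 0], [1, 2], [0, 0], [6, 7]], 3), B returns ([[0, -1], [0, 0], [1, 2], [0, 0], [3, 4]], 0)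
import Mathlib
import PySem

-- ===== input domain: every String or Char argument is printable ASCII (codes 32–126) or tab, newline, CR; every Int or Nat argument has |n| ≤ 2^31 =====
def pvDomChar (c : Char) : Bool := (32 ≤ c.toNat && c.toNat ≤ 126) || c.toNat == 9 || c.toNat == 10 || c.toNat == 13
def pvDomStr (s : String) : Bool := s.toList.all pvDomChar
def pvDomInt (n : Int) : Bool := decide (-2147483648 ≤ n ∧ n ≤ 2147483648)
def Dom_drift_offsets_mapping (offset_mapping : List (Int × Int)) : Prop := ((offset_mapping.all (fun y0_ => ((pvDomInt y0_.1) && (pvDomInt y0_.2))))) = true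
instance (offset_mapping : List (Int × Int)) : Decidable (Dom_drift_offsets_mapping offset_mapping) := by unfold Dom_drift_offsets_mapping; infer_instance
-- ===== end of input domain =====

-- B replaces A's flag-driven in-place pass by a delimiter-split: split the tail on (0,0)
-- sentinels into segments, shift every segment after the first by the boundary drift, rejoin
-- with (0,0) separators (objective: alternative).  Python A mutates only its own local copy
-- of the argument, so return values are the whole behaviour.

-- ===== PORT A =====
-- A's loop body for one index: read arr[index], possibly (re)set drift when the pair is
-- (0,0) and drift is still 0, skip (0,0) pairs, otherwise add drift in place.
-- Python's list-of-lists copy is carried as pairs and converted to 2-element lists at return.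
def driftStepA (st : List (Int × Int) × Int) (index : Nat) : List (Int × Int) × Int :=
  let arr := st.1
  let mapping := arr.getD index (0, 0)
  let drift := if mapping.1 = 0 ∧ mapping.2 = 0 ∧ st.2 = 0
               then (arr.getD (index - 1) (0, 0)).2 + 1 else st.2
  if mapping.1 = 0 ∧ mapping.2 = 0 then (arr, drift)
  else (arr.set index (mapping.1 + drift, mapping.2 + drift), drift)

def drift_offsets_mapping (offset_mapping : List (Int × Int)) : List (List Int) × Int :=
  let res := (List.range' 1 (offset_mapping.length - 1)).foldl driftStepA (offset_mapping, 0)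
  (res.1.map (fun p => [p.1, p.2]), res.2)

-- ===== PORT B =====
-- B: split the tail (everything after index 0) on (0,0) delimiters into segments, exactly
-- Source B's accumulate-at-the-end loop; if there is only one segment return unchanged with
-- drift 0; else drift = last entry before the first delimiter + 1, shift every later
-- segment wholesale, rejoin with (0,0) separators.  Pairs are converted to 2-element
-- lists at return, as in port A.
def pvSplitStep (segs : List (List (Int × Int))) (p : Int × Int) : List (List (Int × Int)) :=
  if p = (0, 0) then segs ++ [[]]
  else segs.dropLast ++ [segs.getLastD [] ++ [p]]

def pvJoinStep (acc : List (Int × Int)) (seg : List (Int × Int)) : List (Int × Int) :=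
  acc ++ [(0, 0)] ++ seg

def drift_offsets_mapping_alt (offset_mapping : List (Int × Int)) : List (List Int) × Int :=
  let head := offset_mapping.take 1
  let tail := offset_mapping.drop 1
  let segments := tail.foldl pvSplitStep [[]]
  if segments.length = 1 then
    ((head ++ segments.headD []).map (fun p => [p.1, p.2]), 0)
  else
    let drift := ((head ++ segments.headD []).getLastD (0, 0)).2 + 1
    let shifted := (segments.drop 1).map (fun seg => seg.map (fun p => (p.1 + drift, p.2 + drift)))
    let out := shifted.foldl pvJoinStep (head ++ segments.headD [])
    (out.map (fun p => [p.1, p.2]), drift)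

-- ===== PRECONDITION & SPEC =====
-- On inputs whose first (0,0) pair follows an entry ending in -1 while a later (0,0) follows
-- an entry not ending in -1, A's drift==0 "not yet set" sentinel accidentally re-triggers and
-- A shifts the tail by that later boundary; B uses the first (0,0) as the [SEP] boundary
-- (drift 0), the intended behaviour since drift==0 is only A's leftover sentinel state.
def D_drift_offsets_mapping (offset_mapping : List (Int × Int)) : Prop :=
  let z := offset_mapping.zip offset_mapping.tail
  ((z.find? (·.2 == (0, 0))).any (·.1.2 == -1) && z.any (fun r => r.2 == (0, 0) && r.1.2 != -1)) = true
instance (offset_mapping : List (Int × Int)) : Decidable (D_drift_offsets_mapping offset_mapping) := by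
  unfold D_drift_offsets_mapping; infer_instance

def Spec_drift_offsets_mapping (offset_mapping : List (Int × Int)) (out : List (List Int) × Int) : Prop :=
  ¬ D_drift_offsets_mapping offset_mapping → out = drift_offsets_mapping_alt offset_mapping
instance (offset_mapping : List (Int × Int)) (out : List (List Int) × Int) : Decidable (Spec_drift_offsets_mapping offset_mapping out) := by
  unfold Spec_drift_offsets_mapping; infer_instance

def pvDiffWitness_drift_offsets_mapping : (List (Int × Int)) :=
  [(0, -1), (0, 0), (1, 2), (0, 0), (3, 4)]
def pvDiffWitnessOut_drift_offsets_mapping : (List (List Int) × Int) × (List (List Int) × Int) :=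
  (([[0, -1], [0, 0], [1, 2], [0, 0], [6, 7]], 3),
   ([[0, -1], [0, 0], [1, 2], [0, 0], [3, 4]], 0))

-- ===== CLAIM (what is proved, stated in full; the proofs are below) =====
def Claim_unchanged_drift_offsets_mapping : Prop := ∀ (offset_mapping : List (Int × Int)), Dom_drift_offsets_mapping offset_mapping → Spec_drift_offsets_mapping offset_mapping (drift_offsets_mapping offset_mapping)
def Claim_changed_drift_offsets_mapping : Prop := Dom_drift_offsets_mapping (pvDiffWitness_drift_offsets_mapping) ∧ D_drift_offsets_mapping (pvDiffWitness_drift_offsets_mapping) ∧ drift_offsets_mapping (pvDiffWitness_drift_offsets_mapping) = pvDiffWitnessOut_drift_offsets_mapping.1 ∧ drift_offsets_mapping_alt (pvDiffWitness_drift_offsets_mapping) = pvDiffWitnessOut_drift_offsets_mapping.2 ∧ pvDiffWitnessOut_drift_offsets_mapping.1 ≠ pvDiffWitnessOut_drift_offsets_mapping.2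
def Claim_exact_drift_offsets_mapping : Prop := ∀ (offset_mapping : List (Int × Int)), Dom_drift_offsets_mapping offset_mapping → D_drift_offsets_mapping offset_mapping → drift_offsets_mapping offset_mapping ≠ drift_offsets_mapping_alt offset_mapping

-- ===== LEMMAS AND PROOFS =====

-- The change region, re-read as the index-wise condition the proofs below use:
-- the first (0,0) pair at index i ≥ 1 has om[i-1].2 = -1 and some later (0,0) at j has om[j-1].2 ≠ -1.
lemma D_iff (om : List (Int × Int)) :
    D_drift_offsets_mapping om ↔
      ∃ i ∈ List.range om.length, 1 ≤ i ∧ om[i]? = some (0, 0) ∧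
        (∀ k ∈ List.range i, 1 ≤ k → om[k]? ≠ some (0, 0)) ∧
        (om.getD (i - 1) (0, 0)).2 = -1 ∧
        ∃ j ∈ List.range om.length, i < j ∧ om[j]? = some (0, 0) ∧
          (om.getD (j - 1) (0, 0)).2 ≠ -1 := by
  have hzlen : (om.zip om.tail).length = om.length - 1 := by
    simp [List.length_zip]
  have hzget : ∀ k (hk : k < (om.zip om.tail).length),
      (om.zip om.tail)[k] = (om[k]'(by omega), om[k + 1]'(by omega)) := by
    intro k hk
    rw [List.getElem_zip]
    exact congrArg _ (List.getElem_tail _)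
  constructor
  · intro h
    unfold D_drift_offsets_mapping at h
    simp only [Bool.and_eq_true] at h
    obtain ⟨h1, h2⟩ := h
    cases hfq : (om.zip om.tail).find? (fun r => r.2 == (0, 0)) with
    | none => rw [hfq] at h1; simp [Option.any] at h1
    | some q =>
      rw [hfq] at h1
      simp only [Option.any, beq_iff_eq] at h1
      obtain ⟨hpq, as, bs, hsplit, hfail⟩ := List.find?_eq_some_iff_append.mp hfq
      simp only [beq_iff_eq] at hpq
      have hasl : as.length < (om.zip om.tail).length := by rw [hsplit]; simp
      have hin : as.length + 1 < om.length := by omega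
      have hqi : (om.zip om.tail)[as.length]'hasl = q := List.getElem_of_append hsplit rfl
      rw [hzget as.length hasl] at hqi
      have hom1 : om[as.length + 1]'(by omega) = (0, 0) := by rw [← hpq, ← hqi]
      have hom0 : (om[as.length]'(by omega)).2 = -1 := by rw [← hqi] at h1; exact h1
      have hminI : ∀ k ∈ List.range (as.length + 1), 1 ≤ k → om[k]? ≠ some (0, 0) := by
        intro k hk hk1 hcon
        have hk' : k - 1 < as.length := by have := List.mem_range.mp hk; omega
        have hx : (om.zip om.tail)[k - 1]'(by omega) = as[k - 1]'hk' := by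
          simp only [hsplit]
          exact List.getElem_append_left hk'
        have hfl := hfail (as[k - 1]'hk') (List.getElem_mem hk')
        rw [← hx, hzget (k - 1) (by omega)] at hfl
        simp only [show k - 1 + 1 = k from by omega] at hfl
        rw [List.getElem?_eq_getElem (by omega : k < om.length)] at hcon
        have : om[k]'(by omega) = (0, 0) := by injection hcon
        simp [this] at hfl
      obtain ⟨r, hrmem, hrp⟩ := List.any_eq_true.mp h2
      simp only [Bool.and_eq_true, beq_iff_eq, bne_iff_ne, ne_eq] at hrp
      obtain ⟨jz, hjz, hjzeq⟩ := List.mem_iff_getElem.mp hrmem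
      rw [hzget jz hjz] at hjzeq
      have hj2 : om[jz + 1]'(by omega) = (0, 0) := by rw [← hjzeq] at hrp; exact hrp.1
      have hj3 : (om[jz]'(by omega)).2 ≠ -1 := by rw [← hjzeq] at hrp; exact hrp.2
      have hij : as.length + 1 < jz + 1 := by
        rcases Nat.lt_trichotomy (jz + 1) (as.length + 1) with hlt | heq | hgt
        · exfalso
          apply hminI (jz + 1) (List.mem_range.mpr (by omega)) (by omega)
          rw [List.getElem?_eq_getElem (by omega : jz + 1 < om.length)]
          exact congrArg some hj2
        · exfalso
          apply hj3
          simp only [show jz = as.length from by omega]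
          exact hom0
        · exact hgt
      refine ⟨as.length + 1, List.mem_range.mpr (by omega), by omega, ?_, hminI, ?_,
        jz + 1, List.mem_range.mpr (by omega), hij, ?_, ?_⟩
      · rw [List.getElem?_eq_getElem (by omega : as.length + 1 < om.length)]
        exact congrArg some hom1
      · rw [show as.length + 1 - 1 = as.length from rfl,
          List.getD_eq_getElem om (0, 0) (by omega : as.length < om.length)]
        exact hom0
      · rw [List.getElem?_eq_getElem (by omega : jz + 1 < om.length)]
        exact congrArg some hj2
      · rw [show jz + 1 - 1 = jz from rfl, List.getD_eq_getElem om (0, 0) (by omega : jz < om.length)]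
        exact hj3
  · rintro ⟨i, hir, hi1, hi2, hmin, hprev, j, hjr, hj1, hj2, hj3⟩
    have hin : i < om.length := List.mem_range.mp hir
    have hjn : j < om.length := List.mem_range.mp hjr
    have hival : om[i] = (0, 0) := by
      rw [List.getElem?_eq_getElem hin] at hi2; injection hi2
    have hjval : om[j] = (0, 0) := by
      rw [List.getElem?_eq_getElem hjn] at hj2; injection hj2
    have hizl : i - 1 < (om.zip om.tail).length := by omega
    unfold D_drift_offsets_mapping
    simp only [Bool.and_eq_true]
    constructor
    · have hfind : (om.zip om.tail).find? (fun r => r.2 == (0, 0))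
          = some ((om.zip om.tail)[i - 1]'hizl) := by
        apply List.find?_eq_some_iff_append.mpr
        refine ⟨?_, (om.zip om.tail).take (i - 1), (om.zip om.tail).drop i, ?_, ?_⟩
        · rw [hzget (i - 1) hizl]
          simp only [show i - 1 + 1 = i from by omega]
          simp [hival]
        · conv_lhs => rw [← List.take_append_drop (i - 1) (om.zip om.tail)]
          congr 1
          rw [List.drop_eq_getElem_cons hizl]
          simp only [show i - 1 + 1 = i from by omega]
        · intro x hx
          obtain ⟨k, hk, hkeq⟩ := List.mem_iff_getElem.mp hx
          have hki : k < i - 1 := by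
            have := hk; simp at this; omega
          rw [List.getElem_take, hzget k (by omega)] at hkeq
          have hne := hmin (k + 1) (List.mem_range.mpr (by omega)) (by omega)
          rw [List.getElem?_eq_getElem (by omega : k + 1 < om.length)] at hne
          have : om[k + 1]'(by omega) ≠ (0, 0) := fun hcc => hne (congrArg some hcc)
          simp [← hkeq, this]
      rw [hfind]
      simp only [Option.any, beq_iff_eq]
      rw [hzget (i - 1) hizl]
      simp only []
      rw [List.getD_eq_getElem om (0, 0) (by omega : i - 1 < om.length)] at hprev
      exact hprev
    · rw [List.any_eq_true]
      have hjzl : j - 1 < (om.zip om.tail).length := by omega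
      refine ⟨(om.zip om.tail)[j - 1]'hjzl, List.getElem_mem hjzl, ?_⟩
      rw [hzget (j - 1) hjzl]
      simp only [show j - 1 + 1 = j from by omega]
      rw [List.getD_eq_getElem om (0, 0) (by omega : j - 1 < om.length)] at hj3
      simp [hjval, hj3]

-- Once drift is nonzero A never changes it again.
lemma foldA_snd_of_ne (l : List Nat) : ∀ (st : List (Int × Int) × Int), st.2 ≠ 0 →
    (l.foldl driftStepA st).2 = st.2 := by
  induction l with
  | nil => intro st _; rfl
  | cons a l ih =>
    intro st h
    have hstep : (driftStepA st a).2 = st.2 := by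
      unfold driftStepA
      simp only []
      split_ifs with h1 h2 h3 <;> simp_all
    simp only [List.foldl_cons]
    rw [ih _ (by rw [hstep]; exact h), hstep]

-- While every (0,0) pair seen has a previous entry ending in -1, A's state stays (om, 0).
lemma foldA_zero (om : List (Int × Int)) (m : Nat) :
    ∀ (k : Nat), 1 ≤ k → k + m ≤ om.length →
    (∀ i, k ≤ i → i < k + m → om[i]? = some (0, 0) → (om.getD (i - 1) (0, 0)).2 = -1) →
    (List.range' k m).foldl driftStepA (om, 0) = (om, 0) := by
  induction m with
  | zero => intro k _ _ _; rfl
  | succ m ih =>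
    intro k hk hlen hprev
    have hkl : k < om.length := by omega
    have hsome : om[k]? = some om[k] := List.getElem?_eq_getElem hkl
    have hrange : List.range' k (m + 1) = k :: List.range' (k + 1) m := by
      simpa using List.range'_succ (s := k) (n := m)
    rw [hrange, List.foldl_cons]
    have hstep : driftStepA (om, 0) k = (om, 0) := by
      by_cases hz : om[k].1 = 0 ∧ om[k].2 = 0
      · have h00 : om[k]? = some (0, 0) := by
          rw [hsome]; exact congrArg some (Prod.ext hz.1 hz.2)
        have hp := hprev k (le_refl k) (by omega) h00
        rw [List.getD_eq_getElem?_getD] at hp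
        simp [driftStepA, hsome, hz, hp]
      · simp [driftStepA, hsome, hz, List.set_getElem_self hkl]
    rw [hstep]
    exact ih (k + 1) (by omega) (by omega) (fun i h1 h2 h3 => hprev i (by omega) (by omega) h3)

-- With a nonzero drift, A just shifts every remaining non-(0,0) pair.
lemma foldA_shift (om : List (Int × Int)) (d : Int) (hd : d ≠ 0) (m : Nat) :
    ∀ (k : Nat) (arr0 : List (Int × Int)), arr0.length = k → k + m = om.length →
    (List.range' k m).foldl driftStepA (arr0 ++ om.drop k, d)
      = (arr0 ++ (om.drop k).map (fun p => if p.1 = 0 ∧ p.2 = 0 then p else (p.1 + d, p.2 + d)), d) := by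
  induction m with
  | zero =>
    intro k arr0 h0 hlen
    have : om.drop k = [] := List.drop_eq_nil_of_le (by omega)
    simp [this]
  | succ m ih =>
    intro k arr0 h0 hlen
    have hkl : k < om.length := by omega
    have hdrop : om.drop k = om[k] :: om.drop (k + 1) := List.drop_eq_getElem_cons hkl
    have hrange : List.range' k (m + 1) = k :: List.range' (k + 1) m := by
      simpa using List.range'_succ (s := k) (n := m)
    rw [hrange, List.foldl_cons]
    have hsome : (arr0 ++ om.drop k)[k]? = some om[k] := by
      rw [List.getElem?_append_right (by omega), hdrop]
      simp [h0]
    by_cases hz : om[k].1 = 0 ∧ om[k].2 = 0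
    · have hstep : driftStepA (arr0 ++ om.drop k, d) k = (arr0 ++ om.drop k, d) := by
        simp [driftStepA, hsome, hz, hd]
      have hassoc : arr0 ++ om.drop k = (arr0 ++ [om[k]]) ++ om.drop (k + 1) := by
        rw [hdrop]; simp
      have hfz : (if om[k].1 = 0 ∧ om[k].2 = 0 then om[k] else (om[k].1 + d, om[k].2 + d)) = om[k] := if_pos hz
      rw [hstep, hassoc, ih (k + 1) (arr0 ++ [om[k]]) (by simp [h0]) (by omega), hdrop,
        List.map_cons, hfz]
      simp
    · have hset : (arr0 ++ om.drop k).set k (om[k].1 + d, om[k].2 + d)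
          = (arr0 ++ [(om[k].1 + d, om[k].2 + d)]) ++ om.drop (k + 1) := by
        rw [hdrop, List.set_append_right _ _ (by omega), h0, Nat.sub_self, List.set_cons_zero]
        simp
      have hstep : driftStepA (arr0 ++ om.drop k, d) k
          = ((arr0 ++ [(om[k].1 + d, om[k].2 + d)]) ++ om.drop (k + 1), d) := by
        simp [driftStepA, hsome, hz, hd, hset]
      have hfz : (if om[k].1 = 0 ∧ om[k].2 = 0 then om[k] else (om[k].1 + d, om[k].2 + d))
          = (om[k].1 + d, om[k].2 + d) := if_neg hz
      rw [hstep, ih (k + 1) (arr0 ++ [(om[k].1 + d, om[k].2 + d)]) (by simp [h0]) (by omega), hdrop,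
        List.map_cons, hfz]
      simp

-- If some remaining (0,0) pair has a previous entry not ending in -1, A ends with drift ≠ 0.
lemma foldA_nonzero (om : List (Int × Int)) (m : Nat) :
    ∀ (k : Nat), 1 ≤ k → k + m = om.length →
    (∃ j, k ≤ j ∧ j < k + m ∧ om[j]? = some (0, 0) ∧ (om.getD (j - 1) (0, 0)).2 ≠ -1) →
    ((List.range' k m).foldl driftStepA (om, 0)).2 ≠ 0 := by
  induction m with
  | zero => intro k _ _ ⟨j, h1, h2, _⟩; omega
  | succ m ih =>
    intro k hk hlen ⟨j, hj1, hj2, hj3, hj4⟩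
    have hkl : k < om.length := by omega
    have hsome : om[k]? = some om[k] := List.getElem?_eq_getElem hkl
    have hrange : List.range' k (m + 1) = k :: List.range' (k + 1) m := by
      simpa using List.range'_succ (s := k) (n := m)
    rw [hrange, List.foldl_cons]
    by_cases hz : om[k].1 = 0 ∧ om[k].2 = 0
    · by_cases hp : (om.getD (k - 1) (0, 0)).2 = -1
      · have hp' := hp
        rw [List.getD_eq_getElem?_getD] at hp'
        have hstep : driftStepA (om, 0) k = (om, 0) := by
          simp [driftStepA, hsome, hz, hp']
        rw [hstep]
        refine ih (k + 1) (by omega) (by omega) ⟨j, ?_, by omega, hj3, hj4⟩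
        rcases Nat.eq_or_lt_of_le hj1 with h | h
        · exact absurd hp (h ▸ hj4)
        · omega
      · have hp' := hp
        rw [List.getD_eq_getElem?_getD] at hp'
        have hstep : driftStepA (om, 0) k = (om, (om[k - 1]?.getD (0, 0)).2 + 1) := by
          simp [driftStepA, hsome, hz]
        rw [hstep, foldA_snd_of_ne _ _ (by simp only []; omega)]
        simp only []
        omega
    · have h00 : om[k]? ≠ some (0, 0) := by
        rw [hsome]
        intro h
        have : om[k] = (0, 0) := by injection h
        exact hz ⟨by rw [this], by rw [this]⟩
      have hstep : driftStepA (om, 0) k = (om, 0) := by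
        simp [driftStepA, hsome, hz, List.set_getElem_self hkl]
      rw [hstep]
      refine ih (k + 1) (by omega) (by omega) ⟨j, ?_, by omega, hj3, hj4⟩
      rcases Nat.eq_or_lt_of_le hj1 with h | h
      · exact absurd hj3 (h ▸ h00)
      · omega

-- find? on a unit-step range returns the least index satisfying the predicate.
lemma find?_range'_spec {p : Nat → Bool} (m : Nat) :
    ∀ (s j : Nat), (List.range' s m).find? p = some j →
      s ≤ j ∧ j < s + m ∧ p j = true ∧ ∀ i, s ≤ i → i < j → p i = false := by
  induction m with
  | zero => intro s j h; simp at h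
  | succ m ih =>
    intro s j h
    have hrange : List.range' s (m + 1) = s :: List.range' (s + 1) m := by
      simpa using List.range'_succ (s := s) (n := m)
    rw [hrange] at h
    cases hps : p s with
    | true =>
      rw [List.find?_cons_of_pos hps] at h
      obtain rfl : s = j := by injection h
      exact ⟨le_refl _, by omega, hps, fun i h1 h2 => by omega⟩
    | false =>
      rw [List.find?_cons_of_neg (by simp [hps])] at h
      obtain ⟨h1, h2, h3, h4⟩ := ih (s + 1) j h
      refine ⟨by omega, by omega, h3, fun i hi1 hi2 => ?_⟩
      rcases Nat.eq_or_lt_of_le hi1 with h | h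
      · exact h ▸ hps
      · exact h4 i h hi2

-- Proof-only normal form of B: first (0,0) index via find?, then shift the tail after it.
-- (Used only to factor the proof: B's split/rejoin is first shown equal to this form,
-- then A is shown equal to it by the loop-invariant lemmas above.)
def findShiftForm (om : List (Int × Int)) : List (List Int) × Int :=
  match (List.range' 1 (om.length - 1)).find?
      (fun i => decide ((om.getD i (0, 0)).1 = 0 ∧ (om.getD i (0, 0)).2 = 0)) with
  | none => (om.map (fun p => [p.1, p.2]), 0)
  | some s =>
    let drift := (om.getD (s - 1) (0, 0)).2 + 1
    ((om.take (s + 1)).map (fun p => [p.1, p.2]) ++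
     (om.drop (s + 1)).map
       (fun p => if p.1 = 0 ∧ p.2 = 0 then [(0 : Int), 0] else [p.1 + drift, p.2 + drift]),
     drift)

-- Recursive characterisation of Source B's split loop.
def splitRec : List (Int × Int) → List (List (Int × Int))
  | [] => [[]]
  | p :: tl =>
    if p = (0, 0) then [] :: splitRec tl
    else
      match splitRec tl with
      | [] => [[p]]
      | s :: ss => (p :: s) :: ss

lemma splitRec_ne_nil (v : List (Int × Int)) : splitRec v ≠ [] := by
  cases v with
  | nil => simp [splitRec]
  | cons p tl =>
    unfold splitRec
    split_ifs
    · simp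
    · cases splitRec tl <;> simp

def mergeHead (x : List (Int × Int)) : List (List (Int × Int)) → List (List (Int × Int))
  | [] => [x]
  | s :: ss => (x ++ s) :: ss

lemma foldl_splitStep (tl : List (Int × Int)) :
    ∀ (pre : List (List (Int × Int))) (last : List (Int × Int)),
      tl.foldl pvSplitStep (pre ++ [last]) = pre ++ mergeHead last (splitRec tl) := by
  induction tl with
  | nil => intro pre last; simp [splitRec, mergeHead]
  | cons p tl ih =>
    intro pre last
    rw [List.foldl_cons]
    by_cases hp : p = (0, 0)
    · have hstep : pvSplitStep (pre ++ [last]) p = (pre ++ [last]) ++ [[]] := by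
        simp [pvSplitStep, hp]
      rw [hstep, ih (pre ++ [last]) []]
      obtain ⟨s, ss, hss⟩ : ∃ s ss, splitRec tl = s :: ss := by
        cases h : splitRec tl with
        | nil => exact absurd h (splitRec_ne_nil tl)
        | cons s ss => exact ⟨s, ss, rfl⟩
      simp [splitRec, hp, hss, mergeHead]
    · have hstep : pvSplitStep (pre ++ [last]) p = pre ++ [last ++ [p]] := by
        simp [pvSplitStep, hp]
      rw [hstep, ih pre (last ++ [p])]
      obtain ⟨s, ss, hss⟩ : ∃ s ss, splitRec tl = s :: ss := by
        cases h : splitRec tl with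
        | nil => exact absurd h (splitRec_ne_nil tl)
        | cons s ss => exact ⟨s, ss, rfl⟩
      simp [splitRec, hp, hss, mergeHead]

lemma foldl_splitStep_nil (tl : List (Int × Int)) :
    tl.foldl pvSplitStep [[]] = splitRec tl := by
  have h := foldl_splitStep tl [] []
  simp only [List.nil_append] at h
  rw [h]
  obtain ⟨s, ss, hss⟩ : ∃ s ss, splitRec tl = s :: ss := by
    cases h : splitRec tl with
    | nil => exact absurd h (splitRec_ne_nil tl)
    | cons s ss => exact ⟨s, ss, rfl⟩
  simp [hss, mergeHead]

lemma splitRec_no_delim (v : List (Int × Int)) (h : (0, 0) ∉ v) : splitRec v = [v] := by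
  induction v with
  | nil => rfl
  | cons p tl ih =>
    have hp : p ≠ (0, 0) := fun hc => h (hc ▸ List.mem_cons_self)
    have htl := ih (fun hc => h (List.mem_cons_of_mem _ hc))
    simp [splitRec, hp, htl]

lemma splitRec_append_delim (u v : List (Int × Int)) (h : (0, 0) ∉ u) :
    splitRec (u ++ (0, 0) :: v) = u :: splitRec v := by
  induction u with
  | nil => simp [splitRec]
  | cons p u ih =>
    have hp : p ≠ (0, 0) := fun hc => h (hc ▸ List.mem_cons_self)
    have hu := ih (fun hc => h (List.mem_cons_of_mem _ hc))
    simp [splitRec, hp, hu]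

lemma foldl_joinStep (segs : List (List (Int × Int))) :
    ∀ acc, segs.foldl pvJoinStep acc = acc ++ (segs.map (fun s => (0, 0) :: s)).flatten := by
  induction segs with
  | nil => intro acc; simp
  | cons s ss ih =>
    intro acc
    rw [List.foldl_cons, ih]
    simp [pvJoinStep]

lemma flatten_splitRec (d : Int) (v : List (Int × Int)) :
    (((splitRec v).map (fun seg => seg.map (fun p => (p.1 + d, p.2 + d)))).map
        (fun s => ((0, 0) : Int × Int) :: s)).flatten
      = (0, 0) :: v.map (fun p => if p.1 = 0 ∧ p.2 = 0 then p else (p.1 + d, p.2 + d)) := by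
  induction v with
  | nil => simp [splitRec]
  | cons p tl ih =>
    by_cases hp : p = (0, 0)
    · have hpz : p.1 = 0 ∧ p.2 = 0 := by rw [hp]; exact ⟨rfl, rfl⟩
      simp only [splitRec, if_pos hp, List.map_cons, List.flatten_cons, List.map_nil]
      rw [ih]
      simp [hp]
    · have hpz : ¬ (p.1 = 0 ∧ p.2 = 0) := by
        intro hc; exact hp (Prod.ext hc.1 hc.2)
      obtain ⟨s, ss, hss⟩ : ∃ s ss, splitRec tl = s :: ss := by
        cases h : splitRec tl with
        | nil => exact absurd h (splitRec_ne_nil tl)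
        | cons s ss => exact ⟨s, ss, rfl⟩
      rw [hss] at ih
      simp only [List.map_cons, List.flatten_cons, List.cons_append] at ih
      have ih' : (s.map (fun p => (p.1 + d, p.2 + d))) ++
          ((ss.map (fun seg => seg.map (fun p => (p.1 + d, p.2 + d)))).map
            (fun s => ((0, 0) : Int × Int) :: s)).flatten
          = tl.map (fun p => if p.1 = 0 ∧ p.2 = 0 then p else (p.1 + d, p.2 + d)) := by
        exact List.cons_injective ih
      simp only [splitRec, if_neg hp, hss, List.map_cons, List.flatten_cons, List.cons_append]
      rw [if_neg hpz, ih']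

lemma getLastD_take (om : List (Int × Int)) (s : Nat) (h1 : 1 ≤ s) (h2 : s ≤ om.length) :
    (om.take s).getLastD (0, 0) = om.getD (s - 1) (0, 0) := by
  have hlen : (om.take s).length = s := by simp [Nat.min_eq_left h2]
  have hne : om.take s ≠ [] := by
    intro hc; rw [hc] at hlen; simp at hlen; omega
  rw [List.getLastD_eq_getLast? , List.getLast?_eq_getElem?, hlen,
    List.getElem?_take_of_lt (by omega : s - 1 < s), List.getD_eq_getElem?_getD]

-- B's split/rejoin equals the find-then-shift normal form, on every input.
lemma alt_eq_findShiftForm (om : List (Int × Int)) :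
    drift_offsets_mapping_alt om = findShiftForm om := by
  unfold drift_offsets_mapping_alt findShiftForm
  cases hfind : (List.range' 1 (om.length - 1)).find?
      (fun i => decide ((om.getD i (0, 0)).1 = 0 ∧ (om.getD i (0, 0)).2 = 0)) with
  | none =>
    have hnone := List.find?_eq_none.mp hfind
    have hnod : (0, 0) ∉ om.drop 1 := by
      intro hmem
      obtain ⟨k, hk, hkeq⟩ := List.mem_iff_getElem.mp hmem
      have hkl : k + 1 < om.length := by
        have := hk; simp at this; omega
      have hel : om[k + 1]'hkl = (0, 0) := by
        rw [← hkeq, List.getElem_drop]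
        congr 1
        omega
      have hmem' : k + 1 ∈ List.range' 1 (om.length - 1) :=
        List.mem_range'_1.mpr ⟨by omega, by omega⟩
      have := hnone (k + 1) hmem'
      rw [List.getD_eq_getElem om (0, 0) hkl, hel] at this
      simp at this
    have hseg : (om.drop 1).foldl pvSplitStep [[]] = [om.drop 1] := by
      rw [foldl_splitStep_nil, splitRec_no_delim _ hnod]
    simp only [hseg, List.headD_cons, List.length_cons, List.length_nil, Nat.zero_add,
      if_pos, List.take_append_drop]
  | some s =>
    obtain ⟨hs1, hs2, hs3, hmin⟩ := find?_range'_spec _ _ _ hfind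
    have hsn : s < om.length := by omega
    have hsval : om[s] = (0, 0) := by
      rw [List.getD_eq_getElem om (0, 0) hsn] at hs3
      simp only [decide_eq_true_eq] at hs3
      exact Prod.ext hs3.1 hs3.2
    -- decompose the tail at the first delimiter
    have htlen : (om.drop 1).length = om.length - 1 := by simp
    have hsplit : om.drop 1 = (om.drop 1).take (s - 1) ++ (0, 0) :: (om.drop 1).drop s := by
      have hlt : s - 1 < (om.drop 1).length := by omega
      have h? : (om.drop 1)[s - 1]? = some (0, 0) := by
        rw [List.getElem?_drop, show 1 + (s - 1) = s from by omega,
          List.getElem?_eq_getElem hsn, hsval]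
      have hel : (om.drop 1)[s - 1]'hlt = (0, 0) :=
        Option.some.inj ((List.getElem?_eq_getElem hlt).symm.trans h?)
      conv_lhs => rw [← List.take_append_drop (s - 1) (om.drop 1)]
      rw [List.drop_eq_getElem_cons hlt, hel]
      rw [show s - 1 + 1 = s from by omega]
    have hnodu : (0, 0) ∉ (om.drop 1).take (s - 1) := by
      intro hmem
      obtain ⟨k, hk, hkeq⟩ := List.mem_iff_getElem.mp hmem
      have hks : k < s - 1 := by
        have := hk; simp at this; omega
      have hkl : k + 1 < om.length := by omega
      have hel : om[k + 1]'hkl = (0, 0) := by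
        rw [← hkeq, List.getElem_take, List.getElem_drop]
        congr 1
        omega
      have := hmin (k + 1) (by omega) (by omega)
      rw [List.getD_eq_getElem om (0, 0) hkl, hel] at this
      simp at this
    have hseg : (om.drop 1).foldl pvSplitStep [[]]
        = (om.drop 1).take (s - 1) :: splitRec ((om.drop 1).drop s) := by
      rw [foldl_splitStep_nil]
      conv_lhs => rw [hsplit]
      exact splitRec_append_delim _ _ hnodu
    obtain ⟨t, ts, hts⟩ : ∃ t ts, splitRec ((om.drop 1).drop s) = t :: ts := by
      cases h : splitRec ((om.drop 1).drop s) with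
      | nil => exact absurd h (splitRec_ne_nil _)
      | cons t ts => exact ⟨t, ts, rfl⟩
    have hlen2 : ((om.drop 1).foldl pvSplitStep [[]]).length ≠ 1 := by
      rw [hseg, hts]; simp
    rw [if_neg hlen2]
    have hheadu : om.take 1 ++ ((om.drop 1).foldl pvSplitStep [[]]).headD [] = om.take s := by
      rw [hseg, List.headD_cons]
      conv_rhs => rw [show s = 1 + (s - 1) from by omega]
      rw [List.take_add]
    have hdrift : ((om.take 1 ++ ((om.drop 1).foldl pvSplitStep [[]]).headD []).getLastD (0, 0)).2 + 1
        = (om.getD (s - 1) (0, 0)).2 + 1 := by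
      rw [hheadu, getLastD_take om s hs1 (by omega)]
    have hv : (om.drop 1).drop s = om.drop (s + 1) := by
      rw [List.drop_drop, Nat.add_comm]
    -- assemble
    simp only [hdrift]
    refine Prod.ext ?_ rfl
    simp only []
    rw [foldl_joinStep, hheadu, hseg, List.drop_one, List.tail_cons, hv, flatten_splitRec]
    set d := (om.getD (s - 1) (0, 0)).2 + 1 with hd
    rw [List.map_append]
    have htake : om.take (s + 1) = om.take s ++ [(0, 0)] := by
      rw [List.take_add_one, List.getElem?_eq_getElem hsn, hsval]
      rfl
    rw [htake, List.map_append, List.map_cons]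
    simp only [List.map_cons, List.map_map, List.append_assoc, List.cons_append,
      List.map_nil, List.nil_append]
    congr 1
    · congr 1
      apply List.map_congr_left
      intro p _
      by_cases hp : p.1 = 0 ∧ p.2 = 0
      · simp [hp, Function.comp]
      · simp [hp, Function.comp]

-- A equals the find-then-shift normal form outside D_.
theorem drift_offsets_mapping_spec_aux (om : List (Int × Int))
    (hD : ¬ D_drift_offsets_mapping om) :
    drift_offsets_mapping om = findShiftForm om := by
  rw [D_iff om] at hD
  unfold drift_offsets_mapping findShiftForm
  cases hfind : (List.range' 1 (om.length - 1)).find?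
      (fun i => decide ((om.getD i (0, 0)).1 = 0 ∧ (om.getD i (0, 0)).2 = 0)) with
  | none =>
    have hnone := List.find?_eq_none.mp hfind
    rcases Nat.eq_zero_or_pos om.length with h0 | h0
    · have : om = [] := List.eq_nil_of_length_eq_zero h0
      subst this; rfl
    · have hfold : (List.range' 1 (om.length - 1)).foldl driftStepA (om, 0) = (om, 0) := by
        apply foldA_zero om (om.length - 1) 1 (le_refl 1) (by omega)
        intro i hi1 hi2 hi3
        exfalso
        have hmem : i ∈ List.range' 1 (om.length - 1) := List.mem_range'_1.mpr ⟨hi1, hi2⟩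
        have := hnone i hmem
        have hil : i < om.length := by omega
        have hsomei : om[i]? = some om[i] := List.getElem?_eq_getElem hil
        rw [hsomei] at hi3
        have heq : om[i] = (0, 0) := by injection hi3
        simp [List.getD_eq_getElem?_getD, hsomei, heq] at this
      simp [hfold]
  | some s =>
    dsimp only
    obtain ⟨hs1, hs2, hs3, hmin⟩ := find?_range'_spec _ _ _ hfind
    have hn2 : s < om.length := by omega
    have hsval : om[s] = (0, 0) := by
      rw [List.getD_eq_getElem om (0, 0) hn2] at hs3
      simp only [decide_eq_true_eq] at hs3
      exact Prod.ext hs3.1 hs3.2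
    have hnoprev : ∀ i, 1 ≤ i → i < s → om[i]? ≠ some (0, 0) := by
      intro i h1 h2 hcontra
      have hil : i < om.length := by omega
      have hmi := hmin i h1 h2
      have hsomei : om[i]? = some om[i] := List.getElem?_eq_getElem hil
      rw [hsomei] at hcontra
      have heq : om[i] = (0, 0) := by injection hcontra
      simp [List.getD_eq_getElem?_getD, hsomei, heq] at hmi
    -- split the loop at s
    have hsplit : List.range' 1 (om.length - 1) = List.range' 1 (s - 1) ++ List.range' s (om.length - s) := by
      have hra := List.range'_append (s := 1) (m := s - 1) (n := om.length - s) (step := 1)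
      rw [show 1 + 1 * (s - 1) = s by omega] at hra
      rw [hra]
      congr 1
      omega
    rw [hsplit, List.foldl_append]
    have hfold1 : (List.range' 1 (s - 1)).foldl driftStepA (om, 0) = (om, 0) := by
      apply foldA_zero om (s - 1) 1 (le_refl 1) (by omega)
      intro i hi1 hi2 hi3
      exact absurd hi3 (hnoprev i hi1 (by omega))
    rw [hfold1]
    have hrs : List.range' s (om.length - s) = s :: List.range' (s + 1) (om.length - s - 1) := by
      have : om.length - s = (om.length - s - 1) + 1 := by omega
      rw [this]
      simpa using List.range'_succ (s := s) (n := om.length - s - 1)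
    rw [hrs, List.foldl_cons]
    have hsome : om[s]? = some om[s] := List.getElem?_eq_getElem hn2
    set d := (om.getD (s - 1) (0, 0)).2 + 1 with hd_def
    have hstep : driftStepA (om, 0) s = (om, d) := by
      simp [driftStepA, hsome, hsval, hd_def, List.getD_eq_getElem?_getD]
    rw [hstep]
    by_cases hd : d = 0
    · -- drift candidate is 0: outside D_ every later (0,0) also has a -1 boundary; A stays put
      have hprev : (om.getD (s - 1) (0, 0)).2 = -1 := by omega
      have hlater : ∀ j, s < j → j < om.length → om[j]? = some (0, 0) →
          (om.getD (j - 1) (0, 0)).2 = -1 := by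
        intro j hj1 hj2 hj3
        by_contra hne
        exact hD ⟨s, List.mem_range.mpr hn2, hs1,
          by rw [List.getElem?_eq_getElem hn2]; exact congrArg some hsval,
          fun k hk hk1 => hnoprev k hk1 (List.mem_range.mp hk), hprev,
          j, List.mem_range.mpr hj2, hj1, hj3, hne⟩
      have hfold2 : (List.range' (s + 1) (om.length - s - 1)).foldl driftStepA (om, 0) = (om, 0) := by
        apply foldA_zero om (om.length - s - 1) (s + 1) (by omega) (by omega)
        intro i hi1 hi2 hi3
        exact hlater i (by omega) (by omega) hi3
      rw [hd, hfold2]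
      have htail : om.map (fun p => [p.1, p.2])
          = (om.take (s + 1)).map (fun p => [p.1, p.2]) ++
            (om.drop (s + 1)).map (fun p => if p.1 = 0 ∧ p.2 = 0 then [(0 : Int), 0]
              else [p.1 + (0 : Int), p.2 + (0 : Int)]) := by
        conv_lhs => rw [← List.take_append_drop (s + 1) om]
        rw [List.map_append]
        congr 1
        apply List.map_congr_left
        intro p _
        by_cases hp : p.1 = 0 ∧ p.2 = 0
        · simp [hp]
        · simp [hp]
      rw [htail]
    · -- drift candidate nonzero: A shifts the tail, exactly the second phase of the form
      have hfold2 := foldA_shift om d hd (om.length - s - 1) (s + 1) (om.take (s + 1))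
        (by simp [Nat.min_eq_left (by omega : s + 1 ≤ om.length)]) (by omega)
      rw [List.take_append_drop] at hfold2
      rw [hfold2]
      rw [List.map_append, List.map_map]
      congr 1
      congr 1
      apply List.map_congr_left
      intro p _
      by_cases hp : p.1 = 0 ∧ p.2 = 0
      · simp [hp, Function.comp]
      · simp [hp, Function.comp]

-- ===== VERDICT (by name: the statement is the Claim_ definition above) =====
theorem drift_offsets_mapping_spec : Claim_unchanged_drift_offsets_mapping := by
  intro om _
  unfold Spec_drift_offsets_mapping
  intro hD
  rw [drift_offsets_mapping_spec_aux om hD, alt_eq_findShiftForm om]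

theorem drift_offsets_mapping_changed : Claim_changed_drift_offsets_mapping := by
  unfold Claim_changed_drift_offsets_mapping; decide

theorem drift_offsets_mapping_tight : Claim_exact_drift_offsets_mapping := by
  intro om _ hD heq
  obtain ⟨i, hir, hi1, hi2, himin, hiprev, j, hjr, hj1, hj2, hj3⟩ := (D_iff om).mp hD
  have hin : i < om.length := List.mem_range.mp hir
  have hjn : j < om.length := List.mem_range.mp hjr
  have hival : om[i] = (0, 0) := by
    rw [List.getElem?_eq_getElem hin] at hi2; injection hi2
  -- A's final drift is nonzero
  have hA : (drift_offsets_mapping om).2 ≠ 0 := by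
    unfold drift_offsets_mapping
    simp only []
    exact foldA_nonzero om (om.length - 1) 1 (le_refl 1) (by omega)
      ⟨j, by omega, by omega, hj2, hj3⟩
  -- B's drift is zero: its boundary is the first (0,0), whose previous entry ends in -1
  have hB : (drift_offsets_mapping_alt om).2 = 0 := by
    rw [alt_eq_findShiftForm om]
    unfold findShiftForm
    cases hfind : (List.range' 1 (om.length - 1)).find?
        (fun k => decide ((om.getD k (0, 0)).1 = 0 ∧ (om.getD k (0, 0)).2 = 0)) with
    | none => rfl
    | some s =>
      obtain ⟨hs1, hs2, hs3, hmin⟩ := find?_range'_spec _ _ _ hfind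
      have hsn : s < om.length := by omega
      have hsval : om[s] = (0, 0) := by
        rw [List.getD_eq_getElem om (0, 0) hsn] at hs3
        simp only [decide_eq_true_eq] at hs3
        exact Prod.ext hs3.1 hs3.2
      have hsi : s = i := by
        rcases Nat.lt_trichotomy s i with h | h | h
        · exfalso
          exact himin s (List.mem_range.mpr h) hs1
            (by rw [List.getElem?_eq_getElem hsn]; exact congrArg some hsval)
        · exact h
        · exfalso
          have hmi := hmin i hi1 h
          have hsomei : om[i]? = some om[i] := List.getElem?_eq_getElem hin
          simp [List.getD_eq_getElem?_getD, hsomei, hival] at hmi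
      subst hsi
      simp only []
      omega
  rw [heq] at hA
  exact hA hB
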